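-- pv_equiv track=rewrite | github.com/MatveyChvikov/systems-analysis-decision-making | task1/task.py | parse_csv_to_adj_matrix
-- ===== SOURCE A (Python) =====
-- from typing import List, Tuple
--
-- def parse_csv_to_adj_matrix(csv_graph: str) -> Tuple[List[List[int]], List[int]]:
--     edges = []
--     vertices = set()
--     for line in csv_graph.strip().splitlines():
--         v_start, v_end = map(int, line.replace(' ', '').split(','))
--         edges.append((v_start, v_end))
--         vertices.add(v_start)
--         vertices.add(v_end)
--     vertices_sorted = sorted(vertices)
--     v_idx = {v: i for i, v in enumerate(vertices_sorted)}
--     n = len(vertices_sorted)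
--     matrix = [[0]*n for _ in range(n)]
--     for v_start, v_end in edges:
--         matrix[v_idx[v_start]][v_idx[v_end]] = 1
--     return matrix, vertices_sorted
-- ===== SOURCE B (Python) =====
-- def parse_csv_to_adj_matrix(csv_graph):
--     edges = []
--     vertices = set()
--     for line in csv_graph.strip().splitlines():
--         v_start, v_end = map(int, line.replace(' ', '').split(','))
--         edges.append((v_start, v_end))
--         vertices.add(v_start)
--         vertices.add(v_end)
--     vertices_sorted = sorted(vertices)
--     v_idx = {v: i for i, v in enumerate(vertices_sorted)}
--     edge_set = {(v_idx[s], v_idx[e]) for s, e in edges}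
--     n = len(vertices_sorted)
--     matrix = [[1 if (i, j) in edge_set else 0 for j in range(n)] for i in range(n)]
--     return matrix, vertices_sorted
-- ===== Notes on version B (the rewrite author's own statement) =====
-- stated objective: alternative
-- what changed: Instead of allocating an n×n zero matrix and mutating cells per edge, B builds a set of index pairs and generates the whole matrix in one dense pass, each cell by a membership test.
import Mathlib
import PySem

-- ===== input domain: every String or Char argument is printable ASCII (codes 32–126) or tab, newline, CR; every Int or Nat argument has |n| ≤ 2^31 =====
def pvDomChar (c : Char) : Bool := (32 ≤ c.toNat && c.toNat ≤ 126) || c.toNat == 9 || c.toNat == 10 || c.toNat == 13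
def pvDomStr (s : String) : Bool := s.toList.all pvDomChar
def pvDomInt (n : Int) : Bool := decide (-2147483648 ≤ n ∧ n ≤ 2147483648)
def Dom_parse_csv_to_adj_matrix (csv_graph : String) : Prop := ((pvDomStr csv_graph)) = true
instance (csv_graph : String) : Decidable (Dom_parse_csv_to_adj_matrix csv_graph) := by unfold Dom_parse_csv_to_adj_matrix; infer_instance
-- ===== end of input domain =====

-- B replaces A's sparse per-edge mutation of a zero matrix by building a set of index pairs
-- and generating the whole n×n matrix in one dense pass via membership tests (alternative, same cost).


-- ===== PORT A =====
-- first pass (source lines identical in A and in B): parse each line into an edge and collect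
-- the vertex set; none = some line does not yield exactly two int()-parsable fields (Python raises there)
def pvReadEdges : List (List Char) → List (Int × Int) → PySem.Set Int → Option (List (Int × Int) × PySem.Set Int)
  | [], edges, vertices => some (edges, vertices)
  | line :: ls, edges, vertices =>
    match (PySem.Chars.splitOn (PySem.Chars.replace line [' '] []) [',']).map PySem.Int.ofChars? with
    | [some a, some b] =>
        pvReadEdges ls (edges ++ [(a, b)]) (PySem.Set.add (PySem.Set.add vertices a) b)
    | _ => none

-- matrix[i][j] = 1  (exact for the nonnegative in-range indices this program produces)
def pvMark (m : List (List Int)) (i j : Int) : List (List Int) :=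
  m.set i.toNat ((m[i.toNat]?.getD []).set j.toNat 1)

def parse_csv_to_adj_matrix (csv_graph : String) : List (List Int) × List Int :=
  match pvReadEdges (PySem.Chars.splitlines (PySem.Chars.strip csv_graph.toList)) [] [] with
  | none => ([], [])   -- unreachable under Pre_ (Python raises there)
  | some (edges, vertices) =>
    let vertices_sorted := PySem.List.sorted vertices (fun v => v)
    -- v_idx[v] always hit with the key present, so getD is exact here
    let v_idx : PySem.Dict Int Int :=
      (PySem.List.enumerate vertices_sorted).foldl (fun d p => d.insert p.2 p.1) PySem.Dict.empty
    let n := vertices_sorted.length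
    let matrix0 := List.replicate n (List.replicate n (0 : Int))
    let matrix := edges.foldl (fun m e => pvMark m (v_idx.getD e.1 0) (v_idx.getD e.2 0)) matrix0
    (matrix, vertices_sorted)

-- ===== PORT B =====
def parse_csv_to_adj_matrix_alt (csv_graph : String) : List (List Int) × List Int :=
  match pvReadEdges (PySem.Chars.splitlines (PySem.Chars.strip csv_graph.toList)) [] [] with
  | none => ([], [])   -- unreachable under Pre_ (Python raises there)
  | some (edges, vertices) =>
    let vertices_sorted := PySem.List.sorted vertices (fun v => v)
    let v_idx : PySem.Dict Int Int :=
      (PySem.List.enumerate vertices_sorted).foldl (fun d p => d.insert p.2 p.1) PySem.Dict.empty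
    let edge_set : PySem.Set (Int × Int) :=
      PySem.Set.ofList (edges.map (fun e => (v_idx.getD e.1 0, v_idx.getD e.2 0)))
    let n := vertices_sorted.length
    let matrix := (PySem.List.pyRange 0 (n : Int) 1).map (fun i =>
      (PySem.List.pyRange 0 (n : Int) 1).map (fun j =>
        if PySem.Set.contains edge_set (i, j) then (1 : Int) else 0))
    (matrix, vertices_sorted)

-- ===== PRECONDITION & SPEC =====
-- Pre_ excludes exactly the inputs on which A RAISES (ValueError/unpacking error): a line that,
-- after removing spaces, does not split on comma into exactly two int()-parsable fields.
def Pre_parse_csv_to_adj_matrix (csv_graph : String) : Prop :=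
  ∀ line ∈ PySem.Chars.splitlines (PySem.Chars.strip csv_graph.toList),
    (PySem.Chars.splitOn (PySem.Chars.replace line [' '] []) [',']).length = 2 ∧
    ∀ f ∈ PySem.Chars.splitOn (PySem.Chars.replace line [' '] []) [','],
      (PySem.Int.ofChars? f).isSome = true
instance (csv_graph : String) : Decidable (Pre_parse_csv_to_adj_matrix csv_graph) := by
  unfold Pre_parse_csv_to_adj_matrix; infer_instance
def pvWitness_parse_csv_to_adj_matrix : String := "1, 2\n2,3\n3,1"
def Spec_parse_csv_to_adj_matrix (csv_graph : String) (out : List (List Int) × List Int) : Prop := out = parse_csv_to_adj_matrix_alt csv_graph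
instance (csv_graph : String) (out : List (List Int) × List Int) : Decidable (Spec_parse_csv_to_adj_matrix csv_graph out) := by unfold Spec_parse_csv_to_adj_matrix; infer_instance

-- ===== CLAIM (what is proved, stated in full; the proofs are below) =====
def Claim_equal_parse_csv_to_adj_matrix : Prop := ∀ (csv_graph : String), Dom_parse_csv_to_adj_matrix csv_graph → Pre_parse_csv_to_adj_matrix csv_graph → Spec_parse_csv_to_adj_matrix csv_graph (parse_csv_to_adj_matrix csv_graph)

-- ===== LEMMAS AND PROOFS =====

-- the dense matrix (List.range n).map … as a function of the cell formula
def pvMk (n : Nat) (f : Nat → Nat → Int) : List (List Int) :=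
  (List.range n).map (fun i => (List.range n).map (fun j => f i j))

lemma pvMk_congr (n : Nat) (f g : Nat → Nat → Int)
    (h : ∀ i j, i < n → j < n → f i j = g i j) : pvMk n f = pvMk n g := by
  unfold pvMk
  refine List.map_congr_left (fun i hi => ?_)
  exact List.map_congr_left (fun j hj => h i j (List.mem_range.mp hi) (List.mem_range.mp hj))

lemma pvReplicate_mk (n : Nat) :
    List.replicate n (List.replicate n (0 : Int)) = pvMk n (fun _ _ => 0) := by
  unfold pvMk
  simp [List.map_const']

lemma pvMark_mk (n : Nat) (f : Nat → Nat → Int) (p : Int × Int)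
    (h1 : 0 ≤ p.1) (h2 : p.1 < n) (h3 : 0 ≤ p.2) (h4 : p.2 < n) :
    pvMark (pvMk n f) p.1 p.2
      = pvMk n (fun i j => if ((i : Int), (j : Int)) = p then 1 else f i j) := by
  unfold pvMark pvMk
  have ha : p.1.toNat < n := by omega
  have hb : p.2.toNat < n := by omega
  have hrow : ((List.range n).map (fun i => (List.range n).map (fun j => f i j)))[p.1.toNat]?.getD []
      = (List.range n).map (fun j => f p.1.toNat j) := by
    simp [ha]
  rw [hrow]
  apply List.ext_getElem
  · simp
  · intro i hi hi2
    simp only [List.length_set, List.length_map, List.length_range] at hi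
    rw [List.getElem_set]
    simp only [List.getElem_map, List.getElem_range]
    by_cases hia : i = p.1.toNat
    · rw [if_pos hia.symm]
      apply List.ext_getElem
      · simp
      · intro j hj hj2
        simp only [List.length_set, List.length_map, List.length_range] at hj
        rw [List.getElem_set]
        simp only [List.getElem_map, List.getElem_range]
        by_cases hjb : j = p.2.toNat
        · rw [if_pos hjb.symm]
          have hpe : ((i : Int), (j : Int)) = p := by
            cases p; simp only [Prod.mk.injEq]; constructor <;> omega
          rw [if_pos hpe]
        · rw [if_neg (fun h => hjb h.symm)]
          have hpe : ¬ (((i : Int), (j : Int)) = p) := by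
            cases p; simp only [Prod.mk.injEq, not_and]; intro _ hc; omega
          rw [if_neg hpe, hia]
    · rw [if_neg (fun h => hia h.symm)]
      apply List.map_congr_left
      intro j hj
      have hpe : ¬ (((i : Int), (j : Int)) = p) := by
        cases p; simp only [Prod.mk.injEq, not_and]; intro hc; omega
      rw [if_neg hpe]

lemma pvFold_mk (es : List (Int × Int)) (n : Nat) (f : Nat → Nat → Int)
    (hb : ∀ p ∈ es, 0 ≤ p.1 ∧ p.1 < n ∧ 0 ≤ p.2 ∧ p.2 < n) :
    es.foldl (fun m p => pvMark m p.1 p.2) (pvMk n f)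
      = pvMk n (fun i j => if ((i : Int), (j : Int)) ∈ es then 1 else f i j) := by
  induction es generalizing f with
  | nil => simp
  | cons p es ih =>
    obtain ⟨hp1, hp2, hp3, hp4⟩ := hb p (by simp)
    rw [List.foldl_cons, pvMark_mk n f p hp1 hp2 hp3 hp4,
        ih _ (fun q hq => hb q (by simp [hq]))]
    apply pvMk_congr
    intro i j _ _
    by_cases h1 : ((i : Int), (j : Int)) ∈ es
    · simp [h1]
    · by_cases h2 : ((i : Int), (j : Int)) = p <;> simp [h1, h2]

lemma pvReadEdges_inv (ls : List (List Char)) :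
    ∀ es vs r, pvReadEdges ls es vs = some r →
      (∀ x ∈ vs, x ∈ r.2) ∧
      ((∀ p ∈ es, p.1 ∈ vs ∧ p.2 ∈ vs) → ∀ p ∈ r.1, p.1 ∈ r.2 ∧ p.2 ∈ r.2) := by
  induction ls with
  | nil => intro es vs r h; simp [pvReadEdges] at h; subst h; exact ⟨fun x hx => hx, fun h => h⟩
  | cons line ls ih =>
    intro es vs r h
    unfold pvReadEdges at h
    split at h
    · rename_i a b heq
      obtain ⟨hsub, hedges⟩ := ih _ _ _ h
      have hmono : ∀ x ∈ vs, x ∈ PySem.Set.add (PySem.Set.add vs a) b := by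
        intro x hx
        rw [PySem.Set.mem_add, PySem.Set.mem_add]
        tauto
      refine ⟨fun x hx => hsub x (hmono x hx), fun hes => ?_⟩
      apply hedges
      intro p hp
      rcases List.mem_append.mp hp with hp | hp
      · obtain ⟨h1, h2⟩ := hes p hp
        exact ⟨hmono _ h1, hmono _ h2⟩
      · simp at hp; subst hp
        constructor
        · rw [PySem.Set.mem_add, PySem.Set.mem_add]; simp
        · rw [PySem.Set.mem_add]; simp
    · exact absurd h (by simp)

lemma pvReadEdges_total (ls : List (List Char))
    (h : ∀ line ∈ ls,
      (PySem.Chars.splitOn (PySem.Chars.replace line [' '] []) [',']).length = 2 ∧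
      ∀ f ∈ PySem.Chars.splitOn (PySem.Chars.replace line [' '] []) [','],
        (PySem.Int.ofChars? f).isSome = true) :
    ∀ es vs, (pvReadEdges ls es vs).isSome = true := by
  induction ls with
  | nil => intro es vs; simp [pvReadEdges]
  | cons line ls ih =>
    intro es vs
    obtain ⟨hlen, hall⟩ := h line (by simp)
    obtain ⟨f1, f2, hfs⟩ := List.length_eq_two.mp hlen
    obtain ⟨a, ha⟩ := Option.isSome_iff_exists.mp (hall f1 (by rw [hfs]; simp))
    obtain ⟨b, hb⟩ := Option.isSome_iff_exists.mp (hall f2 (by rw [hfs]; simp))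
    unfold pvReadEdges
    rw [hfs]
    simp only [List.map_cons, List.map_nil, ha, hb]
    exact ih (fun l hl => h l (by simp [hl])) _ _

lemma pvGetD_bound (ps : List (Int × Int)) (n : Int)
    (hp : ∀ p ∈ ps, 0 ≤ p.1 ∧ p.1 < n) :
    ∀ d : PySem.Dict Int Int, ∀ v : Int,
      (0 ≤ d.getD v 0 ∧ d.getD v 0 < n) →
      0 ≤ (ps.foldl (fun d p => d.insert p.2 p.1) d).getD v 0 ∧
        (ps.foldl (fun d p => d.insert p.2 p.1) d).getD v 0 < n := by
  induction ps with
  | nil => intro d v hd; simpa using hd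
  | cons p ps ih =>
    intro d v hd
    rw [List.foldl_cons]
    apply ih (fun q hq => hp q (by simp [hq]))
    rw [PySem.Dict.getD_insert]
    split
    · exact hp p (by simp)
    · exact hd

-- ===== VERDICT (by name: the statement is the Claim_ definition above) =====
theorem parse_csv_to_adj_matrix_spec : Claim_equal_parse_csv_to_adj_matrix := by
  intro csv hdom hpre
  unfold Spec_parse_csv_to_adj_matrix
  unfold parse_csv_to_adj_matrix parse_csv_to_adj_matrix_alt
  cases h : pvReadEdges (PySem.Chars.splitlines (PySem.Chars.strip csv.toList)) [] [] with
  | none =>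
      have htot := pvReadEdges_total _ hpre [] []
      rw [h] at htot
  | some r =>
      obtain ⟨edges, vertices⟩ := r
      dsimp only
      obtain ⟨_, hedges⟩ := pvReadEdges_inv _ _ _ _ h
      have hends : ∀ p ∈ edges, p.1 ∈ vertices ∧ p.2 ∈ vertices := hedges (by simp)
      set L := PySem.List.sorted vertices (fun v => v) with hL
      set d := List.foldl (fun d p => d.insert p.2 p.1) PySem.Dict.empty (PySem.List.enumerate L) with hd
      set n := L.length with hn
      -- every looked-up index is a legal row/column number
      have hbnd : ∀ v ∈ vertices, 0 ≤ d.getD v 0 ∧ d.getD v 0 < (n : Int) := by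
        intro v hv
        have hvL : v ∈ L := by rw [hL, PySem.List.mem_sorted]; exact hv
        have hn0 : 0 < n := by
          rw [hn]; exact List.length_pos_of_mem hvL
        rw [hd]
        apply pvGetD_bound _ (n : Int)
        · intro p hp
          rw [PySem.List.mem_enumerate_iff] at hp
          obtain ⟨k, hk, rfl⟩ := hp
          refine ⟨by simp, by simp; omega⟩
        · refine ⟨le_refl _, ?_⟩
          show (0 : Int) < n
          exact_mod_cast hn0
      refine Prod.ext ?_ rfl
      show List.foldl (fun m e => pvMark m (d.getD e.1 0) (d.getD e.2 0))
            (List.replicate n (List.replicate n 0)) edges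
          = List.map (fun i => List.map (fun j =>
              if (PySem.Set.ofList (edges.map (fun e => (d.getD e.1 0, d.getD e.2 0)))).contains (i, j)
              then (1 : Int) else 0) (PySem.List.pyRange 0 (n : Int) 1)) (PySem.List.pyRange 0 (n : Int) 1)
      have hfold : List.foldl (fun m e => pvMark m (d.getD e.1 0) (d.getD e.2 0))
            (List.replicate n (List.replicate n 0)) edges
          = List.foldl (fun m p => pvMark m p.1 p.2) (List.replicate n (List.replicate n 0))
              (edges.map (fun e => (d.getD e.1 0, d.getD e.2 0))) :=
        by rw [List.foldl_map]
      have hbounds : ∀ p ∈ edges.map (fun e => (d.getD e.1 0, d.getD e.2 0)),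
          0 ≤ p.1 ∧ p.1 < (n : Int) ∧ 0 ≤ p.2 ∧ p.2 < (n : Int) := by
        intro p hp
        rw [List.mem_map] at hp
        obtain ⟨e, he, rfl⟩ := hp
        obtain ⟨h1, h2⟩ := hends e he
        obtain ⟨b1, b2⟩ := hbnd _ h1
        obtain ⟨b3, b4⟩ := hbnd _ h2
        exact ⟨b1, b2, b3, b4⟩
      have hR : List.map (fun i => List.map (fun j =>
              if (PySem.Set.ofList (edges.map (fun e => (d.getD e.1 0, d.getD e.2 0)))).contains (i, j)
              then (1 : Int) else 0) (PySem.List.pyRange 0 (n : Int) 1)) (PySem.List.pyRange 0 (n : Int) 1)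
          = pvMk n (fun i j => if ((i : Int), (j : Int)) ∈ edges.map (fun e => (d.getD e.1 0, d.getD e.2 0))
              then 1 else 0) := by
        rw [PySem.List.pyRange_zero_natCast, List.map_map]
        unfold pvMk
        apply List.map_congr_left
        intro i _
        simp only [Function.comp_apply, List.map_map]
        apply List.map_congr_left
        intro j _
        simp only [Function.comp_apply]
        simp only [PySem.Set.contains_iff, PySem.Set.mem_ofList]
      rw [hfold, pvReplicate_mk, pvFold_mk _ n _ hbounds, hR]
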